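-- pv_equiv track=rewrite | github.com/ilyacantor/AOS-DCLv2 | backend/engine/schema_loader.py | _detect_semantic_hint
-- ===== SOURCE A (Python) =====
-- from typing import List, Dict, Any, Optional, Tuple
--
-- def _detect_semantic_hint(col_name: str, series: Any) -> str:
--     col_lower = col_name.lower()
--
--     if any(k in col_lower for k in ['id', '_id', 'key']):
--         return "id"
--     if any(k in col_lower for k in ['name', 'title']):
--         return "name"
--     if any(k in col_lower for k in ['email', 'mail']):
--         return "email"
--     if any(k in col_lower for k in ['amount', 'cost', 'price', 'revenue', 'spend']):
--         return "amount"
--     if any(k in col_lower for k in ['date', 'time', 'timestamp', 'created', 'updated']):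
--         return "timestamp"
--     if any(k in col_lower for k in ['status', 'state', 'stage']):
--         return "status"
--     if any(k in col_lower for k in ['region', 'country', 'location']):
--         return "region"
--     if any(k in col_lower for k in ['type', 'category', 'class']):
--         return "category"
--
--     return "generic"
-- ===== SOURCE B (Python) =====
-- # Priority-rank formulation: every keyword maps to the rank of its category in a
-- # flat dict; the answer is the category with the minimum rank among all matching
-- # keywords (min over an unordered match set), not a first-match branch scan.
-- _KW_RANK = {
--     "id": 0, "_id": 0, "key": 0,
--     "name": 1, "title": 1,
--     "email": 2, "mail": 2,
--     "amount": 3, "cost": 3, "price": 3, "revenue": 3, "spend": 3,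
--     "date": 4, "time": 4, "timestamp": 4, "created": 4, "updated": 4,
--     "status": 5, "state": 5, "stage": 5,
--     "region": 6, "country": 6, "location": 6,
--     "type": 7, "category": 7, "class": 7,
-- }
-- _CATS = ["id", "name", "email", "amount", "timestamp", "status", "region", "category"]
--
-- def _detect_semantic_hint(col_name, series):
--     col_lower = col_name.lower()
--     best = min((rank for kw, rank in _KW_RANK.items() if kw in col_lower),
--                default=len(_CATS))
--     return _CATS[best] if best < len(_CATS) else "generic"
-- ===== Notes on version B (the rewrite author's own statement) =====
-- stated objective: alternative
-- what changed: Replaces the eight ordered if-branches with a flat keyword-to-priority-rank map: B takes the minimum rank over the unordered set of matching keywords and indexes a category array, instead of scanning categories in order and returning at the first match.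
import Mathlib
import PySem

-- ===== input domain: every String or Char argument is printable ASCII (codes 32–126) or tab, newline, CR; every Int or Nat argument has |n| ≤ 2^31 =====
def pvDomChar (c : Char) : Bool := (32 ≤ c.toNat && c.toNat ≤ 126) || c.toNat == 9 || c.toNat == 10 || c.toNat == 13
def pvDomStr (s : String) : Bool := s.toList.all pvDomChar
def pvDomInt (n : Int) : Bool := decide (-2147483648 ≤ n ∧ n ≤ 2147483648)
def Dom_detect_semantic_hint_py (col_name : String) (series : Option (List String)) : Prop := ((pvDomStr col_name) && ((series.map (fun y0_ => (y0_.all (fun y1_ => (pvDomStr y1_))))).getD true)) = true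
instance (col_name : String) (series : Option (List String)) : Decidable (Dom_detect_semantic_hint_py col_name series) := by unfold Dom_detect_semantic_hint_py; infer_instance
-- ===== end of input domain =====

-- B replaces the eight ordered if-branches by a flat keyword→priority-rank map: it takes the
-- minimum rank over the set of matching keywords and indexes a category array (alternative; same cost).

-- ===== PORT A =====
def detect_semantic_hint_py (col_name : String) (_series : Option (List String)) : String :=
  let col_lower := PySem.Str.lower col_name
  if ["id", "_id", "key"].any (fun k => PySem.Str.isIn k col_lower) then "id"
  else if ["name", "title"].any (fun k => PySem.Str.isIn k col_lower) then "name"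
  else if ["email", "mail"].any (fun k => PySem.Str.isIn k col_lower) then "email"
  else if ["amount", "cost", "price", "revenue", "spend"].any (fun k => PySem.Str.isIn k col_lower) then "amount"
  else if ["date", "time", "timestamp", "created", "updated"].any (fun k => PySem.Str.isIn k col_lower) then "timestamp"
  else if ["status", "state", "stage"].any (fun k => PySem.Str.isIn k col_lower) then "status"
  else if ["region", "country", "location"].any (fun k => PySem.Str.isIn k col_lower) then "region"
  else if ["type", "category", "class"].any (fun k => PySem.Str.isIn k col_lower) then "category"
  else "generic"

-- ===== PORT B =====
-- the flat keyword → category-rank map of Source B (a dict with distinct keys, in insertion order)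
def pvKwRank : List (String × Nat) :=
  [("id", 0), ("_id", 0), ("key", 0),
   ("name", 1), ("title", 1),
   ("email", 2), ("mail", 2),
   ("amount", 3), ("cost", 3), ("price", 3), ("revenue", 3), ("spend", 3),
   ("date", 4), ("time", 4), ("timestamp", 4), ("created", 4), ("updated", 4),
   ("status", 5), ("state", 5), ("stage", 5),
   ("region", 6), ("country", 6), ("location", 6),
   ("type", 7), ("category", 7), ("class", 7)]

def pvCats : List String :=
  ["id", "name", "email", "amount", "timestamp", "status", "region", "category"]

def detect_semantic_hint_py_alt (col_name : String) (_series : Option (List String)) : String :=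
  let col_lower := PySem.Str.lower col_name
  -- min(ranks of matching keywords, default = len(_CATS))
  let best := (pvKwRank.filterMap
      (fun p => if PySem.Str.isIn p.1 col_lower then some p.2 else none)).foldl min pvCats.length
  if best < pvCats.length then pvCats.getD best "generic" else "generic"

-- ===== PRECONDITION & SPEC =====
def Spec_detect_semantic_hint_py (col_name : String) (series : Option (List String)) (out : String) : Prop := out = detect_semantic_hint_py_alt col_name series
instance (col_name : String) (series : Option (List String)) (out : String) : Decidable (Spec_detect_semantic_hint_py col_name series out) := by unfold Spec_detect_semantic_hint_py; infer_instance

-- ===== CLAIM (what is proved, stated in full; the proofs are below) =====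
def Claim_equal_detect_semantic_hint_py : Prop := ∀ (col_name : String) (series : Option (List String)), Dom_detect_semantic_hint_py col_name series → Spec_detect_semantic_hint_py col_name series (detect_semantic_hint_py col_name series)

-- ===== LEMMAS AND PROOFS =====

-- folding `min` over the matched ranks of a group of entries of constant rank i
theorem pv_foldl_min_const (f : String × Nat → Bool) (i : Nat) :
    ∀ (l : List (String × Nat)), (∀ p ∈ l, p.2 = i) → ∀ (acc : Nat),
      (l.filterMap (fun p => if f p then some p.2 else none)).foldl min acc
        = if l.any f then min acc i else acc := by
  intro l
  induction l with
  | nil => intro _ acc; simp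
  | cons hd tl ih =>
    intro h acc
    have hhd : hd.2 = i := h hd (List.mem_cons_self ..)
    have htl : ∀ p ∈ tl, p.2 = i := fun p hp => h p (List.mem_cons_of_mem _ hp)
    by_cases hm : f hd = true
    · simp only [List.filterMap_cons, hm, if_pos, List.foldl_cons, List.any_cons,
        Bool.true_or, hhd, ih htl (min acc i)]
      by_cases ht : tl.any f = true <;> simp [ht, Nat.min_assoc]
    · have hm' : f hd = false := by simpa using hm
      rw [List.filterMap_cons]
      simp only [hm', Bool.false_eq_true, if_false, List.any_cons, Bool.false_or]
      exact ih htl acc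

-- the two branch shapes agree for every assignment of the eight group-match booleans
theorem pv_chain : ∀ (g0 g1 g2 g3 g4 g5 g6 g7 : Bool),
    (if g0 = true then "id"
     else if g1 = true then "name"
     else if g2 = true then "email"
     else if g3 = true then "amount"
     else if g4 = true then "timestamp"
     else if g5 = true then "status"
     else if g6 = true then "region"
     else if g7 = true then "category"
     else "generic")
    = (let a0 := if g0 = true then min pvCats.length 0 else pvCats.length
       let a1 := if g1 = true then min a0 1 else a0
       let a2 := if g2 = true then min a1 2 else a1
       let a3 := if g3 = true then min a2 3 else a2
       let a4 := if g4 = true then min a3 4 else a3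
       let a5 := if g5 = true then min a4 5 else a4
       let a6 := if g6 = true then min a5 6 else a5
       let a7 := if g7 = true then min a6 7 else a6
       if a7 < pvCats.length then pvCats.getD a7 "generic" else "generic") := by decide

-- ===== VERDICT (by name: the statement is the Claim_ definition above) =====
set_option maxHeartbeats 4000000 in
theorem detect_semantic_hint_py_spec : Claim_equal_detect_semantic_hint_py := by
  intro col_name series _
  unfold Spec_detect_semantic_hint_py detect_semantic_hint_py detect_semantic_hint_py_alt
  generalize PySem.Str.lower col_name = c
  have hsplit : pvKwRank =
      [("id", (0:Nat)), ("_id", 0), ("key", 0)] ++ ([("name", 1), ("title", 1)] ++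
      ([("email", 2), ("mail", 2)] ++
      ([("amount", 3), ("cost", 3), ("price", 3), ("revenue", 3), ("spend", 3)] ++
      ([("date", 4), ("time", 4), ("timestamp", 4), ("created", 4), ("updated", 4)] ++
      ([("status", 5), ("state", 5), ("stage", 5)] ++
      ([("region", 6), ("country", 6), ("location", 6)] ++
       [("type", 7), ("category", 7), ("class", 7)])))))) := rfl
  simp only [hsplit, List.filterMap_append, List.foldl_append,
    pv_foldl_min_const (fun p => PySem.Str.isIn p.1 c) 0 [("id", 0), ("_id", 0), ("key", 0)] (by decide),
    pv_foldl_min_const (fun p => PySem.Str.isIn p.1 c) 1 [("name", 1), ("title", 1)] (by decide),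
    pv_foldl_min_const (fun p => PySem.Str.isIn p.1 c) 2 [("email", 2), ("mail", 2)] (by decide),
    pv_foldl_min_const (fun p => PySem.Str.isIn p.1 c) 3 [("amount", 3), ("cost", 3), ("price", 3), ("revenue", 3), ("spend", 3)] (by decide),
    pv_foldl_min_const (fun p => PySem.Str.isIn p.1 c) 4 [("date", 4), ("time", 4), ("timestamp", 4), ("created", 4), ("updated", 4)] (by decide),
    pv_foldl_min_const (fun p => PySem.Str.isIn p.1 c) 5 [("status", 5), ("state", 5), ("stage", 5)] (by decide),
    pv_foldl_min_const (fun p => PySem.Str.isIn p.1 c) 6 [("region", 6), ("country", 6), ("location", 6)] (by decide),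
    pv_foldl_min_const (fun p => PySem.Str.isIn p.1 c) 7 [("type", 7), ("category", 7), ("class", 7)] (by decide),
    List.any_cons, List.any_nil, Bool.or_false]
  exact pv_chain _ _ _ _ _ _ _ _
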